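-- pv_equiv track=rewrite | github.com/LLagoon3/Programmers | Python3/Level_1/코딩테스트 연습 연습문제 대충 만든 자판.py | solution
-- ===== SOURCE A (Python) =====
-- def solution(s):
--     cnt = 0
--     for k in range(0, len(s)):
--         for i in range(k + 1, len(s)):
--             k_, i_ = k, i
--             if s[k_] == s[i_]:
--                 tmp = s[k_]
--                 while k_ < i_:
--                     k_ += 1
--                     i_ -= 1
--                     if s[k_] != tmp:
--                         cnt += i - k_
--                         break
--                     elif s[i_] != tmp:
--                         cnt += i_ - k
--                         break
--             else:
--                 cnt += i - k
--     return cnt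
-- ===== SOURCE B (Python) =====
-- def solution(s):
--     n = len(s)
--     # nd[j]: smallest index > j with s[index] != s[j], or n if none
--     nd = [n] * n
--     for j in range(n - 2, -1, -1):
--         nd[j] = j + 1 if s[j + 1] != s[j] else nd[j + 1]
--     # pd[j]: largest index < j with s[index] != s[j], or -1 if none
--     pd = [-1] * n
--     for j in range(1, n):
--         pd[j] = j - 1 if s[j - 1] != s[j] else pd[j - 1]
--     cnt = 0
--     for k in range(n):
--         ck = s[k]
--         tL = nd[k] - k
--         for i in range(k + 1, n):
--             g = i - k
--             if ck != s[i]: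
--                 cnt += g
--             else:
--                 t = min(tL, i - pd[i])
--                 if 2 * t <= g + 1:
--                     cnt += g - t
--     return cnt
-- ===== Notes on version B (the rewrite author's own statement) =====
-- stated objective: faster
-- what changed: A's inner while-loop that walks inward from both ends of each equal-character pair is replaced by O(1) arithmetic per pair using two precomputed nearest-different-character index arrays (nd/pd), turning the worst case O(n^3) into O(n^2).
import Mathlib
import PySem

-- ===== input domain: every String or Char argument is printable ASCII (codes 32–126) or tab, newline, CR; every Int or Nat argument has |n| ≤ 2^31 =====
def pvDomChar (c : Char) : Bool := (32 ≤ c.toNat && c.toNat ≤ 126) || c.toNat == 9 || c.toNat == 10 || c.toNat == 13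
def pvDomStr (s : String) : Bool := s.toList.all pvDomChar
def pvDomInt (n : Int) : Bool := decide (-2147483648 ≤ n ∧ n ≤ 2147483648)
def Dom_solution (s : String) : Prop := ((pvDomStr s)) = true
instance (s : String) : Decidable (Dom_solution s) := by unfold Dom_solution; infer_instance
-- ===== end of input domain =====

-- B replaces A's cubic inner while-loop by O(1) arithmetic on precomputed
-- nearest-different-character indices (nd/pd): O(n^3) worst case becomes O(n^2).

-- ===== PORT A =====
-- the inner `while k_ < i_` loop of A (all string indices touched are in range,
-- so `getD` is exact for Python's s[_])
def aWhile (l : List Char) (tmp : Char) (k i k_ i_ : Nat) : Int :=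
  if _h : k_ < i_ then
    let k2 := k_ + 1
    let i2 := i_ - 1
    if l.getD k2 ' ' ≠ tmp then (i : Int) - (k2 : Int)
    else if l.getD i2 ' ' ≠ tmp then (i2 : Int) - (k : Int)
    else aWhile l tmp k i k2 i2
  else 0
termination_by i_ - k_
decreasing_by omega

def solution (s : String) : Int :=
  let l := s.toList
  (List.range l.length).foldl (fun cnt k =>
    (List.range' (k + 1) (l.length - (k + 1))).foldl (fun cnt i =>
      if l.getD k ' ' = l.getD i ' ' then cnt + aWhile l (l.getD k ' ') k i k i
      else cnt + ((i : Int) - (k : Int))) cnt) 0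

-- ===== PORT B =====
-- nd[j]: smallest index > j with a char ≠ s[j], or n; B's backward fill loop
-- expressed as the recursion it computes
def ndVal (l : List Char) (j : Nat) : Nat :=
  if _h : j + 1 < l.length then
    if l.getD (j + 1) ' ' ≠ l.getD j ' ' then j + 1 else ndVal l (j + 1)
  else l.length
termination_by l.length - j
decreasing_by omega

-- pd[j]: largest index < j with a char ≠ s[j], or -1; B's forward fill loop
def pdVal (l : List Char) (j : Nat) : Int :=
  match j with
  | 0 => -1
  | j' + 1 => if l.getD j' ' ' ≠ l.getD (j' + 1) ' ' then (j' : Int) else pdVal l j'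

def solution_alt (s : String) : Int :=
  let l := s.toList
  let n := l.length
  let nd := (List.range n).map (fun j => ndVal l j)
  let pd := (List.range n).map (fun j => pdVal l j)
  (List.range n).foldl (fun cnt k =>
    (List.range' (k + 1) (n - (k + 1))).foldl (fun cnt (i : Nat) =>
      let g : Int := (i : Int) - (k : Int)
      if l.getD k ' ' ≠ l.getD i ' ' then cnt + g
      else
        let t : Int := min ((nd.getD k n : Nat) - (k : Int)) ((i : Int) - pd.getD i (-1))
        if 2 * t ≤ g + 1 then cnt + (g - t) else cnt) cnt) 0

-- ===== PRECONDITION & SPEC =====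
def Spec_solution (s : String) (out : Int) : Prop := out = solution_alt s
instance (s : String) (out : Int) : Decidable (Spec_solution s out) := by unfold Spec_solution; infer_instance

-- ===== CLAIM (what is proved, stated in full; the proofs are below) =====
def Claim_equal_solution : Prop := ∀ (s : String), Dom_solution s → Spec_solution s (solution s)

-- ===== LEMMAS AND PROOFS =====

-- properties of ndVal: it is the nearest different character to the right
theorem ndVal_gt (l : List Char) (j : Nat) (hj : j < l.length) :
    j < ndVal l j ∧ ndVal l j ≤ l.length := by
  rw [ndVal]
  split
  · split
    · omega
    · have := ndVal_gt l (j + 1) (by omega)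
      omega
  · omega
termination_by l.length - j
decreasing_by omega

theorem ndVal_between (l : List Char) (j : Nat) :
    ∀ m, j < m → m < ndVal l j → l.getD m ' ' = l.getD j ' ' := by
  intro m hm1 hm2
  rw [ndVal] at hm2
  split at hm2
  · split at hm2
    · omega
    · rename_i heq
      simp only [ne_eq, not_not] at heq
      rcases Nat.eq_or_lt_of_le hm1 with h | h
      · rw [← h]; exact heq
      · rw [ndVal_between l (j + 1) m h hm2, heq]
  · omega
termination_by l.length - j
decreasing_by omega

theorem ndVal_diff (l : List Char) (j : Nat) :
    ndVal l j < l.length → l.getD (ndVal l j) ' ' ≠ l.getD j ' ' := by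
  rw [ndVal]
  split
  · split
    · intro _; assumption
    · rename_i heq
      intro hlt
      simp only [ne_eq, not_not] at heq
      rw [← heq]
      exact ndVal_diff l (j + 1) hlt
  · omega
termination_by l.length - j
decreasing_by omega

-- properties of pdVal: it is the nearest different character to the left
theorem pdVal_lt (l : List Char) (j : Nat) : -1 ≤ pdVal l j ∧ pdVal l j < (j : Int) := by
  induction j with
  | zero => simp [pdVal]
  | succ j' ih =>
    rw [pdVal]
    split
    · constructor <;> omega
    · push_cast; omega

theorem pdVal_between (l : List Char) (j : Nat) :
    ∀ m : Nat, pdVal l j < (m : Int) → m < j → l.getD m ' ' = l.getD j ' ' := by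
  induction j with
  | zero => omega
  | succ j' ih =>
    intro m hm1 hm2
    rw [pdVal] at hm1
    split at hm1
    · omega
    · rename_i heq
      simp only [ne_eq, not_not] at heq
      rcases Nat.lt_succ_iff_lt_or_eq.mp hm2 with h | h
      · rw [ih m hm1 h, heq]
      · rw [h, heq]

theorem pdVal_diff (l : List Char) (j : Nat) :
    0 ≤ pdVal l j → l.getD (pdVal l j).toNat ' ' ≠ l.getD j ' ' := by
  induction j with
  | zero => intro h; simp [pdVal] at h
  | succ j' ih =>
    intro h
    rw [pdVal] at h ⊢
    by_cases hc : l.getD j' ' ' = l.getD (j' + 1) ' '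
    · rw [if_neg (not_not_intro hc)] at h ⊢
      rw [← hc]
      exact ih h
    · rw [if_pos hc] at h ⊢
      simpa using hc

-- the closed form of A's inner while loop, in terms of ndVal/pdVal
theorem aWhile_closed (l : List Char) (k i : Nat) (k_ i_ : Nat)
    (hki : k < i) (hin : i < l.length)
    (hk : k ≤ k_) (hsum : k_ + i_ = k + i)
    (hc : l.getD i ' ' = l.getD k ' ')
    (hN : k_ < ndVal l k) (hP : pdVal l i < (i_ : Int)) :
    aWhile l (l.getD k ' ') k i k_ i_ =
      (if 2 * min ((ndVal l k : Int) - k) ((i : Int) - pdVal l i) ≤ ((i : Int) - k) + 1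
       then ((i : Int) - k) - min ((ndVal l k : Int) - k) ((i : Int) - pdVal l i)
       else 0) := by
  rw [aWhile]
  by_cases hlt : k_ < i_
  · simp only [hlt, dif_pos]
    have hi2n : i_ - 1 < i := by omega
    have hk2n : k_ + 1 < l.length := by omega
    by_cases hL : l.getD (k_ + 1) ' ' = l.getD k ' '
    · -- left char still equal: ndVal l k > k_ + 1
      have hN2 : k_ + 1 < ndVal l k := by
        rcases Nat.lt_or_ge (k_ + 1) (ndVal l k) with h | h
        · exact h
        · have : ndVal l k = k_ + 1 := by omega
          have hd := ndVal_diff l k (by omega)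
          rw [this] at hd
          exact absurd hL hd
      simp only [ne_eq, hL, not_true_eq_false, if_false]
      by_cases hR : l.getD (i_ - 1) ' ' = l.getD i ' '
      · -- right char still equal: pdVal l i < i_ - 1
        have hP2 : pdVal l i < ((i_ - 1 : Nat) : Int) := by
          rcases Int.lt_or_le (pdVal l i) ((i_ - 1 : Nat) : Int) with h | h
          · exact h
          · have hge0 : 0 ≤ pdVal l i := by
              have := pdVal_lt l i
              omega
            have : pdVal l i = ((i_ - 1 : Nat) : Int) := by
              have := pdVal_lt l i
              omega
            have hd := pdVal_diff l i hge0
            rw [this] at hd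
            simp only [Int.toNat_natCast] at hd
            exact absurd hR hd
        rw [hc] at hR
        simp only [hR, not_true_eq_false, if_false]
        exact aWhile_closed l k i (k_ + 1) (i_ - 1) hki hin (by omega) (by omega) hc hN2 hP2
      · -- right char differs: pdVal l i = i_ - 1, tR = i - i_ + 1 ≤ tL, take right
        have hPeq : pdVal l i = ((i_ - 1 : Nat) : Int) := by
          rcases Int.lt_or_le (pdVal l i) ((i_ - 1 : Nat) : Int) with h | h
          · exfalso
            exact hR (by rw [pdVal_between l i (i_ - 1) h hi2n, hc])
          · have := pdVal_lt l i
            omega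
        rw [hc] at hR
        simp only [hR, not_false_eq_true, if_true]
        have hmin : min ((ndVal l k : Int) - k) ((i : Int) - pdVal l i)
            = (i : Int) - pdVal l i := by
          rw [hPeq]; omega
        rw [hmin, hPeq]
        have : (2 : Int) * ((i : Int) - ((i_ - 1 : Nat) : Int)) ≤ ((i : Int) - k) + 1 := by
          omega
        rw [if_pos this]
        omega
    · -- left char differs: ndVal l k = k_ + 1, tL = k_ + 1 - k ≤ tR, take left
      have hNeq : ndVal l k = k_ + 1 := by
        rcases Nat.lt_or_ge (k_ + 1) (ndVal l k) with h | h
        · exact absurd (ndVal_between l k (k_ + 1) (by omega) h) hL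
        · omega
      simp only [ne_eq, hL, not_false_eq_true, if_true]
      have hmin : min ((ndVal l k : Int) - k) ((i : Int) - pdVal l i)
          = (ndVal l k : Int) - k := by
        rw [hNeq]; push_cast; omega
      rw [hmin, hNeq]
      have : (2 : Int) * (((k_ + 1 : Nat) : Int) - k) ≤ ((i : Int) - k) + 1 := by
        push_cast; omega
      rw [if_pos this]
      push_cast
      omega
  · -- loop over without a break: min is too large, closed form gives 0
    simp only [hlt, dif_neg, not_false_eq_true]
    have : ¬ (2 * min ((ndVal l k : Int) - k) ((i : Int) - pdVal l i) ≤ ((i : Int) - k) + 1) := by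
      have h1 : (k_ : Int) < (ndVal l k : Int) := by exact_mod_cast hN
      omega
    rw [if_neg this]
termination_by i_ - k_
decreasing_by omega

theorem getD_map_range {α : Type} (n k : Nat) (f : Nat → α) (d : α) (hk : k < n) :
    ((List.range n).map f).getD k d = f k := by
  rw [List.getD_eq_getElem?_getD]
  rw [List.getElem?_map]
  simp [hk]

-- ===== VERDICT (by name: the statement is the Claim_ definition above) =====
theorem solution_spec : Claim_equal_solution := by
  intro s _
  unfold Spec_solution solution solution_alt
  set l := s.toList with hl
  simp only []
  apply PySem.List.foldl_congr_mem
  intro cnt k hk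
  have hkn : k < l.length := List.mem_range.mp hk
  apply PySem.List.foldl_congr_mem
  intro acc i hi
  have hii : k + 1 ≤ i ∧ i < k + 1 + (l.length - (k + 1)) := List.mem_range'_1.mp hi
  have hki : k < i := by omega
  have hin : i < l.length := by omega
  rw [getD_map_range l.length k (fun j => ndVal l j) l.length hkn,
      getD_map_range l.length i (fun j => pdVal l j) (-1) hin]
  by_cases hc : l.getD k ' ' = l.getD i ' '
  · rw [if_pos hc, if_neg (by simpa using hc)]
    rw [aWhile_closed l k i k i hki hin (le_refl k) rfl hc.symm
        (ndVal_gt l k hkn).1 (by have := pdVal_lt l i; omega)]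
    split <;> ring
  · rw [if_neg hc, if_pos (by simpa using hc)]
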